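-- pv_equiv track=rewrite | github.com/suhasgumma/Problem-Solving | codeForces/DPPrep/Day1/wowFactor.py | solve
-- ===== SOURCE A (Python) =====
-- def solve(string):
--     n = len(string)
--
--     dp = [0]* n
--
--     for i in range(1, n):
--         if string[i]== "v" and string[i-1] == "v": dp[i] = dp[i-1]+1
--
--         else: dp[i] = dp[i-1]
--
--     res= 0
--
--     for i in range(n):
--         if string[i] == "o":
--             left = dp[i]
--             right = dp[n-1]- dp[i]
--
--             res+= (left*right)
--
--
--     return res
-- ===== SOURCE B (Python) =====
-- def solve(string):
--     # single pass, O(1) extra space: automaton counting partial matches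
--     v_pairs = 0   # adjacent 'vv' pairs seen so far
--     vo = 0        # sum over seen 'o's of pairs to their left
--     res = 0
--     prev = None
--     for c in string:
--         if prev == 'v' and c == 'v':
--             res += vo
--             v_pairs += 1
--         elif c == 'o':
--             vo += v_pairs
--         prev = c
--     return res
-- ===== Notes on version B (the rewrite author's own statement) =====
-- stated objective: faster
-- what changed: Replaced the two-pass dp-prefix-array scheme (build prefix pair counts, then sum left*right at each 'o') by a single left-to-right pass keeping three running integers (pairs seen, sum of left-counts over seen 'o's, result) and the previous character, using O(1) extra space instead of an O(n) dp array.
import Mathlib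
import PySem

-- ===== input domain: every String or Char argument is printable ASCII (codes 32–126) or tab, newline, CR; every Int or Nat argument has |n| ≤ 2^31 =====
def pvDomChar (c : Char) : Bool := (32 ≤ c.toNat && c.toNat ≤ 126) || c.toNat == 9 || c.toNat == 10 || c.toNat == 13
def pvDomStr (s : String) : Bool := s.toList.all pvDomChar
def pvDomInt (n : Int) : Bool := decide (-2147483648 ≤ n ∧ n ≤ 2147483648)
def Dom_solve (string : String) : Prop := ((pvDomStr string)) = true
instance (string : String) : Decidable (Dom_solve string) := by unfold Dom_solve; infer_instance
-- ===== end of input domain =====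

-- B replaces A's two passes over an O(n) dp prefix-pair array by one pass with three
-- running integers and the previous character (O(1) extra space; measurably faster).

-- ===== PORT A =====
def solve (string : String) : Int :=
  let n : Int := PySem.Str.len string
  let dp0 : List Int := PySem.List.pyRepeat [(0 : Int)] n
  let dp : List Int := (PySem.List.pyRange 1 n 1).foldl
    (fun dp i =>
      if PySem.Str.pyGet? string i = some 'v' ∧ PySem.Str.pyGet? string (i - 1) = some 'v'
      then PySem.List.pySetD dp i (PySem.List.pyGetD dp (i - 1) 0 + 1)
      else PySem.List.pySetD dp i (PySem.List.pyGetD dp (i - 1) 0)) dp0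
  (PySem.List.pyRange 0 n 1).foldl
    (fun res i =>
      if PySem.Str.pyGet? string i = some 'o'
      then res + PySem.List.pyGetD dp i 0 * (PySem.List.pyGetD dp (n - 1) 0 - PySem.List.pyGetD dp i 0)
      else res) 0

-- ===== PORT B =====
def solve_alt (string : String) : Int :=
  (string.toList.foldl
    (fun (st : Int × Int × Int × Option Char) c =>
      let (vp, vo, res, prev) := st
      if prev = some 'v' ∧ c = 'v' then (vp + 1, vo, res + vo, some c)
      else if c = 'o' then (vp, vo + vp, res, some c)
      else (vp, vo, res, some c))
    (0, 0, 0, none)).2.2.1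

-- ===== PRECONDITION & SPEC =====
def Spec_solve (string : String) (out : Int) : Prop := out = solve_alt string
instance (string : String) (out : Int) : Decidable (Spec_solve string out) := by unfold Spec_solve; infer_instance

-- ===== CLAIM (what is proved, stated in full; the proofs are below) =====
def Claim_equal_solve : Prop := ∀ (string : String), Dom_solve string → Spec_solve string (solve string)

-- ===== LEMMAS AND PROOFS =====

def pvInd (cs : List Char) (i : Nat) : Int :=
  if cs.getD i ' ' = 'v' ∧ 1 ≤ i ∧ cs.getD (i - 1) ' ' = 'v' then 1 else 0

def pvPc (cs : List Char) : Nat → Int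
  | 0 => 0
  | i + 1 => pvPc cs i + pvInd cs (i + 1)

def pvVo (cs : List Char) (k : Nat) : Int :=
  ((List.range k).map (fun j => if cs.getD j ' ' = 'o' then pvPc cs j else 0)).sum

def pvRes2 (cs : List Char) (k : Nat) (t : Int) : Int :=
  ((List.range k).map (fun j => if cs.getD j ' ' = 'o' then pvPc cs j * (t - pvPc cs j) else 0)).sum

theorem pvRes2_succ_t (cs : List Char) (k : Nat) (t : Int) :
    pvRes2 cs k (t + 1) = pvRes2 cs k t + pvVo cs k := by
  induction k with
  | zero => simp [pvRes2, pvVo]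
  | succ k ih =>
    simp only [pvRes2, pvVo, List.range_succ, List.map_append, List.sum_append] at *
    simp only [List.map_cons, List.map_nil, List.sum_cons, List.sum_nil]
    rw [ih]
    split_ifs <;> ring

theorem pv_dpA (s : String) : ∀ m : Nat, m ≤ s.toList.length →
    (PySem.List.pyRange 1 (m : Int) 1).foldl
      (fun dp i =>
        if PySem.Str.pyGet? s i = some 'v' ∧ PySem.Str.pyGet? s (i - 1) = some 'v'
        then PySem.List.pySetD dp i (PySem.List.pyGetD dp (i - 1) 0 + 1)
        else PySem.List.pySetD dp i (PySem.List.pyGetD dp (i - 1) 0))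
      (List.replicate s.toList.length (0 : Int))
    = (List.range s.toList.length).map
        (fun j => if j < m ∨ j = 0 then pvPc s.toList j else 0) := by
  intro m
  induction m with
  | zero =>
    intro _
    rw [PySem.List.pyRange_one_eq_nil (by norm_num)]
    simp only [List.foldl_nil]
    apply List.ext_getElem (by simp)
    intro j h1 h2
    simp only [List.getElem_replicate, List.getElem_map, List.getElem_range]
    split_ifs with h
    · rcases h with h | h
      · omega
      · subst h; rfl
    · rfl
  | succ m ih =>
    intro hm
    by_cases h0 : m = 0
    · subst h0
      rw [show ((1 : Nat) : Int) = 1 by norm_num, PySem.List.pyRange_one_eq_nil (by norm_num)]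
      simp only [List.foldl_nil]
      apply List.ext_getElem (by simp)
      intro j h1 h2
      simp only [List.getElem_replicate, List.getElem_map, List.getElem_range]
      split_ifs with h
      · have : j = 0 := by omega
        subst this; rfl
      · rfl
    · have h1m : (1 : Int) ≤ (m : Int) := by omega
      have hcast : ((m + 1 : Nat) : Int) = (m : Int) + 1 := by push_cast; ring
      rw [hcast, PySem.List.pyRange_one_succ_right h1m, List.foldl_append, ih (by omega)]
      simp only [List.foldl_cons, List.foldl_nil]
      have hmlt : m < s.toList.length := by omega
      have hm1lt : m - 1 < s.toList.length := by omega
      have hgm : PySem.Str.pyGet? s (m : Int) = some s.toList[m] := by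
        simp [List.getElem?_eq_getElem hmlt]
      have hsub : ((m : Int) - 1) = ((m - 1 : Nat) : Int) := by omega
      have hgm1 : PySem.Str.pyGet? s ((m : Int) - 1) = some s.toList[m - 1] := by
        rw [hsub]; simp [List.getElem?_eq_getElem hm1lt]
      have hget : PySem.List.pyGetD ((List.range s.toList.length).map
          (fun j => if j < m ∨ j = 0 then pvPc s.toList j else 0)) ((m : Int) - 1) 0
          = pvPc s.toList (m - 1) := by
        rw [hsub]
        simp only [PySem.List.pyGetD_natCast]
        rw [List.getD_eq_getElem _ _ (by simpa using hm1lt)]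
        simp only [List.getElem_map, List.getElem_range]
        rw [if_pos (by omega)]
      have hind : pvPc s.toList m = pvPc s.toList (m - 1) + pvInd s.toList m := by
        have : m = (m - 1) + 1 := by omega
        rw [this]; simp [pvPc]
      have hindval : pvInd s.toList m =
          if s.toList[m] = 'v' ∧ s.toList[m - 1] = 'v' then 1 else 0 := by
        unfold pvInd
        rw [List.getD_eq_getElem _ _ hmlt, List.getD_eq_getElem _ _ hm1lt]
        split_ifs with h1 h2 h2 <;> first | rfl | omega | (exfalso; exact h1 ⟨h2.1, by omega, h2.2⟩) | (exfalso; exact h2 ⟨h1.1, h1.2.2⟩)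
      rw [hgm, hgm1, hget]
      by_cases hvv : s.toList[m] = 'v' ∧ s.toList[m - 1] = 'v'
      · rw [if_pos (by simp [hvv.1, hvv.2])]
        simp only [PySem.List.pySetD_natCast]
        apply List.ext_getElem (by simp)
        intro j hj1 hj2
        rw [List.getElem_set]
        simp only [List.getElem_map, List.getElem_range]
        by_cases hjm : m = j
        · subst hjm
          rw [if_pos rfl, if_pos (by omega), hind, hindval, if_pos hvv]
        · rw [if_neg hjm]
          split_ifs <;> first | rfl | omega
      · rw [if_neg (by simpa using hvv)]
        simp only [PySem.List.pySetD_natCast]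
        apply List.ext_getElem (by simp)
        intro j hj1 hj2
        rw [List.getElem_set]
        simp only [List.getElem_map, List.getElem_range]
        by_cases hjm : m = j
        · subst hjm
          rw [if_pos rfl, if_pos (by omega), hind, hindval, if_neg hvv, add_zero]
        · rw [if_neg hjm]
          split_ifs <;> first | rfl | omega

theorem pv_loop2 (s : String) (dp : List Int) (N : Int) :
    ∀ (m : Nat) (r0 : Int), (PySem.List.pyRange 0 (m : Int) 1).foldl
      (fun res i =>
        if PySem.Str.pyGet? s i = some 'o'
        then res + PySem.List.pyGetD dp i 0 * (PySem.List.pyGetD dp (N - 1) 0 - PySem.List.pyGetD dp i 0)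
        else res) r0
    = r0 + ((List.range m).map
        (fun (j : Nat) => if PySem.Str.pyGet? s (j : Int) = some 'o'
          then PySem.List.pyGetD dp (j : Int) 0 * (PySem.List.pyGetD dp (N - 1) 0 - PySem.List.pyGetD dp (j : Int) 0)
          else 0)).sum := by
  intro m
  induction m with
  | zero =>
    intro r0
    rw [show ((0 : Nat) : Int) = 0 by norm_num, PySem.List.pyRange_one_eq_nil (by norm_num)]
    simp
  | succ m ih =>
    intro r0
    have hcast : ((m + 1 : Nat) : Int) = (m : Int) + 1 := by push_cast; ring
    rw [hcast, PySem.List.pyRange_one_succ_right (by omega), List.foldl_append, ih r0]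
    simp only [List.foldl_cons, List.foldl_nil, List.range_succ, List.map_append,
      List.map_cons, List.map_nil, List.sum_append, List.sum_cons, List.sum_nil]
    split_ifs <;> ring

theorem pv_B_inv (s : String) : ∀ k : Nat, k ≤ s.toList.length →
    (s.toList.take k).foldl
      (fun (st : Int × Int × Int × Option Char) c =>
        let (vp, vo, res, prev) := st
        if prev = some 'v' ∧ c = 'v' then (vp + 1, vo, res + vo, some c)
        else if c = 'o' then (vp, vo + vp, res, some c)
        else (vp, vo, res, some c))
      (0, 0, 0, none)
    = (pvPc s.toList (k - 1), pvVo s.toList k, pvRes2 s.toList k (pvPc s.toList (k - 1)),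
       if k = 0 then none else some (s.toList.getD (k - 1) ' ')) := by
  intro k
  induction k with
  | zero =>
    intro _
    simp [pvPc, pvVo, pvRes2]
  | succ k ih =>
    intro hk
    have hklt : k < s.toList.length := by omega
    rw [List.take_add_one, List.getElem?_eq_getElem hklt]
    simp only [Option.toList_some]
    rw [List.foldl_append, ih (by omega)]
    simp only [List.foldl_cons, List.foldl_nil]
    have hgk : s.toList[k] = s.toList.getD k ' ' := (List.getD_eq_getElem _ _ hklt).symm
    have hsub1 : k + 1 - 1 = k := by omega
    have hpcsucc : ∀ m : Nat, 1 ≤ m → pvPc s.toList m = pvPc s.toList (m - 1) + pvInd s.toList m := by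
      intro m hm
      have h : m = (m - 1) + 1 := by omega
      conv_lhs => rw [h]
      simp only [pvPc]
      rw [← h]
    have hvo : pvVo s.toList (k + 1)
        = pvVo s.toList k + (if s.toList.getD k ' ' = 'o' then pvPc s.toList k else 0) := by
      simp [pvVo, List.range_succ]
    have hres : ∀ t : Int, pvRes2 s.toList (k + 1) t
        = pvRes2 s.toList k t + (if s.toList.getD k ' ' = 'o' then pvPc s.toList k * (t - pvPc s.toList k) else 0) := by
      intro t; simp [pvRes2, List.range_succ]
    by_cases hC : (if k = 0 then (none : Option Char) else some (s.toList.getD (k - 1) ' ')) = some 'v' ∧ s.toList[k] = 'v'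
    · -- a new 'vv' pair at position k
      have hk1 : 1 ≤ k := by
        by_contra h
        have h0 : k = 0 := by omega
        rw [if_pos h0] at hC
        exact absurd hC.1 (by simp)
      have hprev : s.toList.getD (k - 1) ' ' = 'v' := by
        rw [if_neg (by omega)] at hC
        exact Option.some_injective _ hC.1
      have hcur : s.toList.getD k ' ' = 'v' := by rw [← hgk]; exact hC.2
      have hind : pvInd s.toList k = 1 := by
        unfold pvInd; rw [if_pos ⟨hcur, hk1, hprev⟩]
      have hpc : pvPc s.toList k = pvPc s.toList (k - 1) + 1 := by
        rw [hpcsucc k hk1, hind]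
      rw [if_pos hC]
      simp only [hsub1, Prod.mk.injEq]
      refine ⟨by rw [hpc], ?_, ?_, by simp [hgk]⟩
      · rw [hvo, hcur]
        simp
      · rw [hres, hcur, hpc]
        rw [pvRes2_succ_t]
        simp
    · rw [if_neg hC]
      have hind : pvPc s.toList k = pvPc s.toList (k - 1) := by
        rcases Nat.eq_zero_or_pos k with h0 | hpos
        · rw [h0]
        · rw [hpcsucc k hpos]
          have : pvInd s.toList k = 0 := by
            unfold pvInd
            rw [if_neg]
            intro ⟨h1, h2, h3⟩
            exact hC ⟨by rw [if_neg (by omega), h3], by rw [hgk, h1]⟩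
          rw [this, add_zero]
      by_cases ho : s.toList[k] = 'o'
      · rw [if_pos ho]
        have ho' : s.toList.getD k ' ' = 'o' := by rw [← hgk, ho]
        simp only [hsub1, Prod.mk.injEq]
        refine ⟨by rw [hind], ?_, ?_, by simp [hgk]⟩
        · rw [hvo, ho', if_pos rfl, hind]
        · rw [hres, ho', if_pos rfl, hind]
          ring_nf
      · rw [if_neg ho]
        have ho' : ¬ s.toList.getD k ' ' = 'o' := by rw [← hgk]; exact ho
        simp only [hsub1, Prod.mk.injEq]
        refine ⟨by rw [hind], ?_, ?_, by simp [hgk]⟩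
        · rw [hvo, if_neg ho', add_zero]
        · rw [hres, if_neg ho', add_zero, hind]

theorem pv_main (s : String) : solve s = solve_alt s := by
  simp only [solve, solve_alt]
  have hlen : PySem.Str.len s = (s.toList.length : Int) := by simp [PySem.Str.len_eq]
  rw [hlen]
  have hrep : PySem.List.pyRepeat [(0 : Int)] ((s.toList.length : Nat) : Int)
      = List.replicate s.toList.length (0 : Int) := by
    rw [PySem.List.pyRepeat_singleton]; simp
  rw [hrep, pv_dpA s s.toList.length le_rfl]
  have hdp : (List.range s.toList.length).map
      (fun j => if j < s.toList.length ∨ j = 0 then pvPc s.toList j else 0)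
      = (List.range s.toList.length).map (pvPc s.toList) := by
    apply List.map_congr_left
    intro j hj
    rw [if_pos (Or.inl (List.mem_range.mp hj))]
  rw [hdp,
    pv_loop2 s ((List.range s.toList.length).map (pvPc s.toList)) ((s.toList.length : Nat) : Int)
      s.toList.length 0,
    zero_add]
  have hB := pv_B_inv s s.toList.length le_rfl
  rw [List.take_length] at hB
  rw [hB]
  simp only []
  unfold pvRes2
  congr 1
  apply List.map_congr_left
  intro j hj
  have hjlt : j < s.toList.length := List.mem_range.mp hj
  have h1 : PySem.Str.pyGet? s (j : Int) = some s.toList[j] := by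
    simp [List.getElem?_eq_getElem hjlt]
  have h2 : PySem.List.pyGetD ((List.range s.toList.length).map (pvPc s.toList)) (j : Int) 0
      = pvPc s.toList j := by
    simp only [PySem.List.pyGetD_natCast]
    rw [List.getD_eq_getElem _ _ (by simpa using hjlt)]
    simp
  have h3 : PySem.List.pyGetD ((List.range s.toList.length).map (pvPc s.toList))
      (((s.toList.length : Nat) : Int) - 1) 0 = pvPc s.toList (s.toList.length - 1) := by
    have hsub : (((s.toList.length : Nat) : Int) - 1) = ((s.toList.length - 1 : Nat) : Int) := by
      omega
    rw [hsub]
    simp only [PySem.List.pyGetD_natCast]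
    rw [List.getD_eq_getElem _ _ (by simp only [List.length_map, List.length_range]; omega)]
    simp
  rw [h1, h2, h3, List.getD_eq_getElem _ _ hjlt]
  split_ifs with ha hb <;> simp_all

-- ===== VERDICT (by name: the statement is the Claim_ definition above) =====
theorem solve_spec : Claim_equal_solve := by
  intro s _
  unfold Spec_solve
  exact pv_main s
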